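-- pv_equiv track=rewrite | github.com/RyperoneR/proyecto_final | 4herramientas.py | obtener_5_consecutivos_mas_altos_mismo_simbolo
-- ===== SOURCE A (Python) =====
-- def obtener_5_consecutivos_mas_altos_mismo_simbolo(lista):
--     # Verificar si la lista tiene al menos 5 elementos
--     if len(lista) < 5:
--         return None
--
--     # Inicializar variables para almacenar los 5 números consecutivos más altos y el símbolo
--     max_consecutivos = None
--     max_suma = float('-inf')
--     simbolo_relacionado = None
--
--     # Verificar si hay 5 números consecutivos con el mismo símbolo
--     for i in range(len(lista) - 4):
--         consecutivos = lista[i:i+5]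
--         simbolo_actual = consecutivos[0][1]
--
--         if all(elemento[1] == simbolo_actual for elemento in consecutivos):
--             suma_actual = sum([elemento[0] for elemento in consecutivos])
--
--             if suma_actual > max_suma:
--                 max_suma = suma_actual
--                 max_consecutivos = consecutivos
--                 simbolo_relacionado = simbolo_actual
--
--     # Devolver los 5 números consecutivos más altos y el símbolo
--     return max_consecutivos, simbolo_relacionado
-- ===== SOURCE B (Python) =====
-- def obtener_5_consecutivos_mas_altos_mismo_simbolo(lista):
--     # Single pass with a run-length counter and a sliding 4+1 buffer instead of
--     # re-slicing and re-checking every 5-window.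
--     if len(lista) < 5:
--         return None
--
--     best_sum = None
--     best_window = None
--     best_symbol = None
--     window = []
--     run = 0
--     prev = None
--
--     for valor, simbolo in lista:
--         run = run + 1 if simbolo == prev else 1
--         prev = simbolo
--         window.append((valor, simbolo))
--         if len(window) == 5:
--             if run >= 5:
--                 s = window[0][0] + window[1][0] + window[2][0] + window[3][0] + window[4][0]
--                 if best_sum is None or s > best_sum:
--                     best_sum = s
--                     best_window = window[:]
--                     best_symbol = simbolo
--             window.pop(0)
--
--     return best_window, best_symbol
-- ===== Notes on version B (the rewrite author's own statement) =====
-- stated objective: alternative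
-- what changed: Replaces the per-index loop that re-slices every 5-window and re-checks all 5 symbols with a single pass maintaining a run-length counter of consecutive equal symbols and a sliding 5-element buffer, so each element is touched O(1) times instead of being re-examined by up to 5 windows. Pre_ excludes lists of length >= 5 with no 5-window of equal symbols, where A returns (None, None) whose first component None is not a value of the declared list type.
import Mathlib
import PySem

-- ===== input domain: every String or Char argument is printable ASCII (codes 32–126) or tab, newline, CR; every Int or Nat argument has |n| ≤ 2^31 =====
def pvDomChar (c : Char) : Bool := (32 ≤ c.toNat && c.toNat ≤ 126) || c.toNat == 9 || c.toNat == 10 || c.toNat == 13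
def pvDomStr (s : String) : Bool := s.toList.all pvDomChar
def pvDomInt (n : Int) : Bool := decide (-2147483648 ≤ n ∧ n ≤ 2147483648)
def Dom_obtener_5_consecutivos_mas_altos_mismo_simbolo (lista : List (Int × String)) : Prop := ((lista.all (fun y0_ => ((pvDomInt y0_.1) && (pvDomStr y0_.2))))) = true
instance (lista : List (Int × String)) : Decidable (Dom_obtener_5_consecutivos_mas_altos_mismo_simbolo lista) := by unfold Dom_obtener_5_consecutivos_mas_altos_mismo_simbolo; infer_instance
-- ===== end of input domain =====

-- B replaces A's re-slice/re-check/re-sum of every 5-window by a single pass with a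
-- run-length counter and a sliding 5-element buffer (a different, one-pass algorithm).

-- ===== PORT A =====
-- loop body of A: slice the 5-window at index i, check all symbols equal, keep the max sum
-- (max_suma = float('-inf') before any update is modelled as `none`: any Int beats it).
def cuerpoA (lista : List (Int × String))
    (st : Option (List (Int × String)) × Option Int × Option String) (i : Int) :
    Option (List (Int × String)) × Option Int × Option String :=
  let consecutivos := PySem.List.slice lista (some i) (some (i + 5))
  -- consecutivos[0][1]: index 0 is in range (the slice has 5 elements since 0 ≤ i < len-4)
  let simbolo_actual := (PySem.List.pyGetD consecutivos 0 (0, "")).2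
  if consecutivos.all (fun elemento => elemento.2 == simbolo_actual) then
    let suma_actual := (consecutivos.map (fun elemento => elemento.1)).sum
    let actualizar := match st.2.1 with | none => true | some m => decide (m < suma_actual)
    if actualizar then (some consecutivos, some suma_actual, some simbolo_actual) else st
  else st

def obtener_5_consecutivos_mas_altos_mismo_simbolo (lista : List (Int × String)) :
    Option ((List (Int × String)) × Option String) :=
  if lista.length < 5 then none
  else
    let r := (PySem.List.pyRange 0 ((lista.length : Int) - 4) 1).foldl (cuerpoA lista) (none, none, none)
    -- Python returns the tuple (max_consecutivos, simbolo_relacionado); the case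
    -- max_consecutivos = None (no qualifying window) is not a value of the declared
    -- type and is excluded by Pre_; we encode it as ([], none) there.
    some (match r.1 with | some w => (w, r.2.2) | none => ([], none))

-- ===== PORT B =====
structure EstadoB where
  best_sum : Option Int
  best_window : Option (List (Int × String))
  best_symbol : Option String
  window : List (Int × String)
  run : Int
  prev : Option String
deriving Repr, DecidableEq

-- loop body of B: bump/reset the run counter, slide the buffer, update the best on a full
-- equal-symbol window.
def cuerpoB (st : EstadoB) (e : Int × String) : EstadoB :=
  let run := if some e.2 == st.prev then st.run + 1 else 1
  let window := st.window ++ [e]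
  if window.length == 5 then
    let st' :=
      if 5 ≤ run then
        let s := (PySem.List.pyGetD window 0 (0, "")).1 + (PySem.List.pyGetD window 1 (0, "")).1
               + (PySem.List.pyGetD window 2 (0, "")).1 + (PySem.List.pyGetD window 3 (0, "")).1
               + (PySem.List.pyGetD window 4 (0, "")).1
        let actualizar := match st.best_sum with | none => true | some m => decide (m < s)
        if actualizar then
          { st with best_sum := some s, best_window := some window, best_symbol := some e.2 }
        else st
      else st
    { st' with window := window.tail, run := run, prev := some e.2 }
  else { st with window := window, run := run, prev := some e.2 }

def obtener_5_consecutivos_mas_altos_mismo_simbolo_alt (lista : List (Int × String)) :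
    Option ((List (Int × String)) × Option String) :=
  if lista.length < 5 then none
  else
    let r := lista.foldl cuerpoB ⟨none, none, none, [], 0, none⟩
    some (match r.best_window with | some w => (w, r.best_symbol) | none => ([], none))

-- ===== PRECONDITION & SPEC =====
-- Pre_ excludes lists of length ≥ 5 containing no 5 consecutive elements with equal
-- symbols: there Python A returns (None, None), whose first component None is not a
-- value of the declared type List (Int × String).
def Pre_obtener_5_consecutivos_mas_altos_mismo_simbolo (lista : List (Int × String)) : Prop :=
  lista.length < 5 ∨
    ((List.range (lista.length - 4)).any (fun i =>
      match (lista.drop i).take 5 with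
      | [] => false
      | x :: resto => resto.all (fun e => e.2 == x.2))) = true

instance (lista : List (Int × String)) : Decidable (Pre_obtener_5_consecutivos_mas_altos_mismo_simbolo lista) := by
  unfold Pre_obtener_5_consecutivos_mas_altos_mismo_simbolo; infer_instance

def pvWitness_obtener_5_consecutivos_mas_altos_mismo_simbolo : (List (Int × String)) :=
  [(1, "a"), (2, "a"), (3, "a"), (4, "a"), (5, "a"), (6, "b")]

def Spec_obtener_5_consecutivos_mas_altos_mismo_simbolo (lista : List (Int × String)) (out : Option ((List (Int × String)) × Option String)) : Prop := out = obtener_5_consecutivos_mas_altos_mismo_simbolo_alt lista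
instance (lista : List (Int × String)) (out : Option ((List (Int × String)) × Option String)) : Decidable (Spec_obtener_5_consecutivos_mas_altos_mismo_simbolo lista out) := by unfold Spec_obtener_5_consecutivos_mas_altos_mismo_simbolo; infer_instance

-- ===== CLAIM (what is proved, stated in full; the proofs are below) =====
def Claim_equal_obtener_5_consecutivos_mas_altos_mismo_simbolo : Prop := ∀ (lista : List (Int × String)), Dom_obtener_5_consecutivos_mas_altos_mismo_simbolo lista → Pre_obtener_5_consecutivos_mas_altos_mismo_simbolo lista → Spec_obtener_5_consecutivos_mas_altos_mismo_simbolo lista (obtener_5_consecutivos_mas_altos_mismo_simbolo lista)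

-- ===== LEMMAS AND PROOFS =====

-- Proof-side window step: A's loop body applied to an explicit window.
def stepW (st : Option (List (Int × String)) × Option Int × Option String)
    (w : List (Int × String)) :
    Option (List (Int × String)) × Option Int × Option String :=
  let simbolo_actual := (PySem.List.pyGetD w 0 (0, "")).2
  if w.all (fun elemento => elemento.2 == simbolo_actual) then
    let suma_actual := (w.map (fun elemento => elemento.1)).sum
    let actualizar := match st.2.1 with | none => true | some m => decide (m < suma_actual)
    if actualizar then (some w, some suma_actual, some simbolo_actual) else st
  else st

-- A's index loop re-expressed as structural recursion over suffixes.
def winFold (st : Option (List (Int × String)) × Option Int × Option String) :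
    List (Int × String) → Option (List (Int × String)) × Option Int × Option String
  | [] => st
  | x :: t => if t.length < 4 then st else winFold (stepW st ((x :: t).take 5)) t

-- length of the maximal constant-symbol suffix of a 4-element buffer [p,q,r,t]
def csl4 (p q r t : Int × String) : Int :=
  if t.2 = r.2 then (if r.2 = q.2 then (if q.2 = p.2 then 4 else 3) else 2) else 1

theorem hq_gen (run : Int) (a b1 b2 b3 : Prop)
    [Decidable a] [Decidable b1] [Decidable b2] [Decidable b3]
    (h2 : min run 4 = (if b1 then (if b2 then (if b3 then (4 : Int) else 3) else 2) else 1)) :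
    (5 ≤ if a then run + 1 else (1 : Int)) ↔ (a ∧ b1 ∧ b2 ∧ b3) := by
  by_cases ha : a <;> by_cases hb1 : b1 <;> by_cases hb2 : b2 <;> by_cases hb3 : b3 <;>
    simp [ha, hb1, hb2, hb3] at h2 ⊢ <;> omega

theorem pres_gen (run : Int) (a b1 b2 b3 : Prop)
    [Decidable a] [Decidable b1] [Decidable b2] [Decidable b3]
    (h2 : min run 4 = (if b1 then (if b2 then (if b3 then (4 : Int) else 3) else 2) else 1)) :
    min (if a then run + 1 else (1 : Int)) 4
      = (if a then (if b1 then (if b2 then (4 : Int) else 3) else 2) else 1) := by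
  by_cases ha : a <;> by_cases hb1 : b1 <;> by_cases hb2 : b2 <;> by_cases hb3 : b3 <;>
    simp [ha, hb1, hb2, hb3] at h2 ⊢ <;> omega

theorem cuerpoA_eq_stepW (lista : List (Int × String)) (st) (k : Nat) :
    cuerpoA lista st (k : Int) = stepW st ((lista.drop k).take 5) := by
  unfold cuerpoA stepW
  rw [show ((k : Int) + 5) = ((k : Int) + ((5:Nat) : Int)) from by push_cast; ring,
      PySem.List.slice_natCast_add]

theorem foldA_eq_winFold (lista : List (Int × String)) (st) :
    (PySem.List.pyRange 0 ((lista.length : Int) - 4) 1).foldl (cuerpoA lista) st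
      = winFold st lista := by
  rw [PySem.List.pyRange_one, List.foldl_map]
  have hc : ∀ (st) (k : Nat), cuerpoA lista st ((0 : Int) + (k : Int)) = stepW st ((lista.drop k).take 5) := by
    intro st k
    rw [zero_add, cuerpoA_eq_stepW]
  simp only [hc]
  have ht : (((lista.length : Int) - 4 - 0)).toNat = lista.length - 4 := by omega
  rw [ht]
  clear hc ht
  induction lista generalizing st with
  | nil => simp [winFold]
  | cons x t ih =>
    by_cases h4 : t.length < 4
    · have h0 : (x :: t).length - 4 = 0 := by simp; omega
      rw [h0]
      simp [winFold, h4]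
    · have h0 : (x :: t).length - 4 = (t.length - 4) + 1 := by simp; omega
      rw [h0, List.range_succ_eq_map, List.foldl_cons, List.foldl_map]
      have hs : ∀ (st) (k : Nat), stepW st (((x :: t).drop (k + 1)).take 5) = stepW st ((t.drop k).take 5) := by
        intro st k; rw [List.drop_succ_cons]
      simp only [Nat.succ_eq_add_one, hs]
      rw [ih]
      simp [winFold, h4]

theorem key (s : List (Int × String)) (p q r t : Int × String) (run : Int)
    (mc : Option (List (Int × String))) (ms : Option Int) (sy : Option String)
    (h1 : 1 ≤ run) (h2 : min run 4 = csl4 p q r t) :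
    winFold (mc, ms, sy) (p :: q :: r :: t :: s)
      = (let res := s.foldl cuerpoB ⟨ms, mc, sy, [p, q, r, t], run, some t.2⟩
         (res.best_window, res.best_sum, res.best_symbol)) := by
  induction s generalizing p q r t run mc ms sy with
  | nil => simp [winFold]
  | cons e s' ih =>
    rw [show winFold (mc, ms, sy) (p :: q :: r :: t :: e :: s')
          = winFold (stepW (mc, ms, sy) [p, q, r, t, e]) (q :: r :: t :: e :: s') from by
        simp [winFold]]
    rw [List.foldl_cons]
    have hq : (5 ≤ if e.2 = t.2 then run + 1 else (1 : Int))
        ↔ (e.2 = t.2 ∧ t.2 = r.2 ∧ r.2 = q.2 ∧ q.2 = p.2) := by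
      unfold csl4 at h2
      exact hq_gen run _ _ _ _ h2
    have hchain : (([p, q, r, t, e].all (fun el => el.2 == p.2)) = true)
        ↔ (e.2 = t.2 ∧ t.2 = r.2 ∧ r.2 = q.2 ∧ q.2 = p.2) := by
      simp; constructor <;> intro h <;> simp_all
    have hcb : cuerpoB ⟨ms, mc, sy, [p, q, r, t], run, some t.2⟩ e =
        ⟨(stepW (mc, ms, sy) [p, q, r, t, e]).2.1,
         (stepW (mc, ms, sy) [p, q, r, t, e]).1,
         (stepW (mc, ms, sy) [p, q, r, t, e]).2.2,
         [q, r, t, e], (if e.2 == t.2 then run + 1 else 1), some e.2⟩ := by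
      by_cases hc : (5 ≤ if e.2 = t.2 then run + 1 else (1 : Int))
      · obtain ⟨c1, c2, c3, c4⟩ := hq.mp hc
        have hep : e.2 = p.2 := c1.trans (c2.trans (c3.trans c4))
        have hal : (([p, q, r, t, e].all (fun el => el.2 == p.2)) = true) :=
          hchain.mpr ⟨c1, c2, c3, c4⟩
        have hc2 : (5 ≤ if p.2 = t.2 then run + 1 else (1 : Int)) := by rwa [hep] at hc
        unfold cuerpoB stepW
        simp [PySem.List.pyGetD, hc2, hal, hep, add_assoc]
        split <;> (simp; try (split <;> simp))
      · have hal : (([p, q, r, t, e].all (fun el => el.2 == p.2)) = false) := by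
          rw [Bool.eq_false_iff]
          intro hcon
          exact hc (hq.mpr (hchain.mp hcon))
        unfold cuerpoB stepW
        simp [PySem.List.pyGetD, hc, hal]
    rw [hcb]
    have h1' : 1 ≤ (if e.2 == t.2 then run + 1 else (1 : Int)) := by split <;> omega
    have h2' : min (if e.2 == t.2 then run + 1 else (1 : Int)) 4 = csl4 q r t e := by
      unfold csl4 at h2 ⊢
      have := pres_gen run (e.2 = t.2) (t.2 = r.2) (r.2 = q.2) (q.2 = p.2) h2
      simpa using this
    rcases hW : stepW (mc, ms, sy) [p, q, r, t, e] with ⟨mc2, ms2, sy2⟩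
    exact ih q r t e _ mc2 ms2 sy2 h1' h2'

theorem ports_eq (lista : List (Int × String)) :
    obtener_5_consecutivos_mas_altos_mismo_simbolo lista
      = obtener_5_consecutivos_mas_altos_mismo_simbolo_alt lista := by
  unfold obtener_5_consecutivos_mas_altos_mismo_simbolo obtener_5_consecutivos_mas_altos_mismo_simbolo_alt
  by_cases h5 : lista.length < 5
  · rw [if_pos h5, if_pos h5]
  · rw [if_neg h5, if_neg h5, foldA_eq_winFold]
    rcases lista with _ | ⟨a, lista⟩
    · exact absurd (by simp) h5
    rcases lista with _ | ⟨b, lista⟩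
    · exact absurd (by simp) h5
    rcases lista with _ | ⟨c, lista⟩
    · exact absurd (by simp) h5
    rcases lista with _ | ⟨d, lista⟩
    · exact absurd (by simp) h5
    rcases lista with _ | ⟨e, rest⟩
    · exact absurd (by simp) h5
    have hB : ∀ xs : List (Int × String),
        (a :: b :: c :: d :: xs).foldl cuerpoB ⟨none, none, none, [], 0, none⟩
          = xs.foldl cuerpoB ⟨none, none, none, [a, b, c, d], csl4 a b c d, some d.2⟩ := by
      intro xs
      simp only [List.foldl_cons]
      congr 1
      by_cases hba : b.2 = a.2 <;> by_cases hcb : c.2 = b.2 <;> by_cases hdc : d.2 = c.2 <;>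
        simp [cuerpoB, csl4, hba, hcb, hdc] <;> try (split_ifs <;> norm_num)
    rw [hB (e :: rest)]
    have h1_0 : 1 ≤ csl4 a b c d := by unfold csl4; split_ifs <;> norm_num
    have h2_0 : min (csl4 a b c d) 4 = csl4 a b c d := by unfold csl4; split_ifs <;> norm_num
    rw [key (e :: rest) a b c d _ none none none h1_0 h2_0]

-- ===== VERDICT (by name: the statement is the Claim_ definition above) =====
theorem obtener_5_consecutivos_mas_altos_mismo_simbolo_spec : Claim_equal_obtener_5_consecutivos_mas_altos_mismo_simbolo := by
  intro lista _ _
  unfold Spec_obtener_5_consecutivos_mas_altos_mismo_simbolo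
  exact ports_eq lista
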